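-- pv_equiv track=rewrite | github.com/Fondamenti18/fondamenti-di-programmazione | students/1798179/homework01/program03.py | coppie
-- ===== SOURCE A (Python) =====
-- def disordinamento(s):
--     a=len(s)-1
--     dis=[]
--     s_dis=""
--     while a>=0:
--         if "a"<=s[a]<="z":
--             dis=[s[a]]+dis
--             if s[a] in dis[1: ]:
--                 dis.remove(s[a])
--         a=a-1
--     return s_dis.join(dis)
--
-- def ordinamento(s):
--     s_ord=""
--     a=disordinamento(s)
--     return s_ord.join(sorted(a))
--
-- def coppie(s1):
--     d={}
--     i=0
--     s=disordinamento(s1)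
--     ss=ordinamento(s1)
--     while i<len(s):
--         d[s[i]]=ss[i]
--         i=i+1
--     return d
-- ===== SOURCE B (Python) =====
-- def coppie(s1):
--     last = {c: i for i, c in enumerate(s1) if 'a' <= c <= 'z'}
--     order = sorted(last, key=last.get)
--     return dict(zip(order, sorted(order)))
-- ===== Notes on version B (the rewrite author's own statement) =====
-- stated objective: faster
-- what changed: Replaces A's three-function right-to-left prepend/remove dedup plus index-driven dict-filling loop by an index-based method: one dict comprehension records each lowercase letter's last occurrence index, the key order is obtained by sorting the distinct letters by that index, and the result is dict(zip(order, sorted(order))).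
import Mathlib
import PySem

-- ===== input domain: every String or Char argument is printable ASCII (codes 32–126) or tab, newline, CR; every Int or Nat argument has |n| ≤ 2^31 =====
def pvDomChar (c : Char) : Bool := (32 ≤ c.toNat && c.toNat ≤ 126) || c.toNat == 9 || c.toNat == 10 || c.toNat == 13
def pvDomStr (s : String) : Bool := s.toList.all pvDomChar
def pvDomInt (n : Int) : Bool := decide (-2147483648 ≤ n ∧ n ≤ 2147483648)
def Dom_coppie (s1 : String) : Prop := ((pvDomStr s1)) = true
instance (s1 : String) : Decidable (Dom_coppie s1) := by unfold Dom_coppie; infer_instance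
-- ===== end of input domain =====

-- B replaces A's right-to-left prepend/remove dedup pipeline by a last-occurrence index map
-- built in one pass, sorting the distinct letters by that index; objective: faster (measured).

-- ===== PORT A =====

-- one iteration of A's while-loop body for the character c = s[a]:
-- "a"<=s[a]<="z" on 1-char strings is the Char comparison (exact, code-point order);
-- dis.remove is PySem.List.remove?, guarded by the membership test, so .getD's default is unused
def pvDisStep (c : Char) (dis : List Char) : List Char :=
  if 'a' ≤ c ∧ c ≤ 'z' then
    let dis' := c :: dis
    if c ∈ dis'.tail then (PySem.List.remove? dis' c).getD dis' else dis'
  else dis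

-- the loop 'a = len(s)-1; while a>=0: … ; a=a-1' reads s[len-1], …, s[0]: a right fold
-- over the characters with the same state dis; "".join of 1-char strings is String.ofList
def disordinamento (s : String) : String :=
  String.ofList (s.toList.foldr pvDisStep [])

def ordinamento (s : String) : String :=
  String.ofList (PySem.List.sorted (disordinamento s).toList (fun c => c) false)

def coppie (s1 : String) : List (String × String) :=
  let s := (disordinamento s1).toList
  let ss := (ordinamento s1).toList
  -- 'i=0; while i<len(s): d[s[i]]=ss[i]; i=i+1' — a fold over the indices 0,…,len(s)-1;
  -- i is always in range so List.getD's default is never used; s[i] is a 1-char string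
  ((List.range s.length).foldl
      (fun d i => d.insert (String.ofList [s.getD i ' ']) (String.ofList [ss.getD i ' ']))
      PySem.Dict.empty).items

-- ===== PORT B =====

def coppie_alt (s1 : String) : List (String × String) :=
  -- {c: i for i, c in enumerate(s1) if 'a' <= c <= 'z'} — a fold of inserts over the
  -- filtered enumeration; iterating a str yields 1-char strings, kept as Char keys
  let last := ((PySem.List.enumerate s1.toList 0).filter
      (fun p => decide ('a' ≤ p.2 ∧ p.2 ≤ 'z'))).foldl
      (fun d p => d.insert p.2 p.1) (PySem.Dict.empty : PySem.Dict Char Int)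
  -- sorted(last, key=last.get): the keys in insertion order, sorted by their stored index
  -- (every key is present in last, so last.get's None never occurs: getD with any default)
  let order := PySem.List.sorted last.keys (fun c => last.getD c 0) false
  -- dict(zip(order, sorted(order)))
  (PySem.Dict.ofList ((order.map (fun c => String.ofList [c])).zip
      ((PySem.List.sorted order (fun c => c) false).map (fun c => String.ofList [c])))).items

-- ===== PRECONDITION & SPEC =====
def Spec_coppie (s1 : String) (out : List (String × String)) : Prop := out = coppie_alt s1
instance (s1 : String) (out : List (String × String)) : Decidable (Spec_coppie s1 out) := by unfold Spec_coppie; infer_instance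

-- ===== CLAIM (what is proved, stated in full; the proofs are below) =====
def Claim_equal_coppie : Prop := ∀ (s1 : String), Dom_coppie s1 → Spec_coppie s1 (coppie s1)

-- ===== LEMMAS AND PROOFS =====

-- abbreviations used only by the proofs
def pvLow (c : Char) : Bool := decide ('a' ≤ c ∧ c ≤ 'z')

def pvF (l : List (Int × Char)) : PySem.Dict Char Int :=
  l.foldl (fun d p => d.insert p.2 p.1) PySem.Dict.empty

theorem pvDisStep_lower {c : Char} (dis : List Char) (h : pvLow c = true) :
    pvDisStep c dis = if c ∈ dis then dis else c :: dis := by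
  simp only [pvLow, decide_eq_true_eq] at h
  unfold pvDisStep
  rw [if_pos h]
  by_cases hm : c ∈ dis
  · simp [hm, PySem.List.remove?_cons_self]
  · simp [hm]

theorem pvDisStep_not_lower {c : Char} (dis : List Char) (h : pvLow c = false) :
    pvDisStep c dis = dis := by
  simp only [pvLow, decide_eq_false_iff_not] at h
  unfold pvDisStep
  rw [if_neg h]

theorem dedup_append_singleton (xs : List Char) (c : Char) :
    PySem.List.dedup (xs ++ [c]) =
      if c ∈ PySem.List.dedup xs then PySem.List.dedup xs else PySem.List.dedup xs ++ [c] := by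
  rw [PySem.List.dedup, PySem.List.dedup, PySem.Set.ofList_eq_foldl, PySem.Set.ofList_eq_foldl,
    List.foldl_append]
  simp only [List.foldl_cons, List.foldl_nil, PySem.Set.add]
  by_cases hm : c ∈ List.foldl PySem.Set.add [] xs
  · simp [PySem.Set.contains, hm]
  · simp [PySem.Set.contains, hm]

-- A's dedup loop keeps the rightmost occurrence of each lowercase letter, in position order
theorem pvMain (l : List Char) :
    l.foldr pvDisStep [] = (PySem.List.dedup ((l.filter pvLow).reverse)).reverse := by
  induction l with
  | nil => simp [PySem.List.dedup, PySem.Set.ofList, PySem.Set.empty]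
  | cons c l ih =>
    by_cases hc : pvLow c = true
    · rw [List.foldr_cons, pvDisStep_lower _ hc, ih]
      rw [List.filter_cons_of_pos hc, List.reverse_cons, dedup_append_singleton]
      by_cases hm : c ∈ PySem.List.dedup (l.filter pvLow).reverse
      · rw [if_pos hm, if_pos (by simpa using hm)]
      · rw [if_neg hm, if_neg (by simpa using hm), List.reverse_append]
        simp
    · rw [List.foldr_cons, pvDisStep_not_lower _ (by simpa using hc), ih,
        List.filter_cons_of_neg (by simpa using hc)]

-- lookup in the insert loop: the LAST pair with the given character wins
theorem pvF_get? (l : List (Int × Char)) (d : PySem.Dict Char Int) (c : Char) :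
    (l.foldl (fun d p => d.insert p.2 p.1) d).get? c =
      match (l.filter (fun p => p.2 == c)).getLast? with
      | some p => some p.1
      | none => d.get? c := by
  induction l generalizing d with
  | nil => rfl
  | cons p t ih =>
    rw [List.foldl_cons, ih]
    by_cases hc : p.2 = c
    · rw [List.filter_cons_of_pos (by simpa using hc)]
      cases h : t.filter (fun p => p.2 == c) with
      | nil => simp [hc, PySem.Dict.get?_insert_self]
      | cons a b =>
        rw [List.getLast?_cons_cons]
        cases hg : (a :: b).getLast? with
        | none => simp at hg
        | some q => simp
    · rw [List.filter_cons_of_neg (by simpa using hc)]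
      cases hemp : (t.filter (fun p => p.2 == c)).getLast? with
      | some q => simp
      | none => exact PySem.Dict.get?_insert_of_ne d p.1 (fun h => hc h.symm)

-- value of B's dict at a character: the index of its LAST filtered occurrence
def pvG (l : List (Int × Char)) (c : Char) : Int :=
  ((l.filter (fun p => p.2 == c)).getLast?).elim 0 Prod.fst

theorem pvG_eq (l : List (Int × Char)) (c : Char) : (pvF l).getD c 0 = pvG l c := by
  rw [PySem.Dict.getD_eq_get?_getD, pvF, pvF_get? l PySem.Dict.empty c]
  cases h : (l.filter (fun p => p.2 == c)).getLast? <;>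
    simp [pvG, h, PySem.Dict.get?_empty]

theorem pvG_concat (t : List (Int × Char)) (p : Int × Char) (c : Char) :
    pvG (t ++ [p]) c = if p.2 = c then p.1 else pvG t c := by
  unfold pvG
  rw [List.filter_append]
  by_cases hp : p.2 = c
  · simp [hp]
  · simp [hp]

theorem pvG_mem (l : List (Int × Char)) (b : Char) (hb : b ∈ l.map Prod.snd) :
    ∃ q ∈ l, q.2 = b ∧ pvG l b = q.1 := by
  obtain ⟨a, ha, ha2⟩ := List.mem_map.mp hb
  have hne : l.filter (fun p => p.2 == b) ≠ [] :=
    List.ne_nil_of_mem (List.mem_filter.mpr ⟨ha, by simp [ha2]⟩)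
  refine ⟨(l.filter (fun p => p.2 == b)).getLast hne, ?_, ?_, ?_⟩
  · exact (List.mem_filter.mp (List.getLast_mem hne)).1
  · have := (List.mem_filter.mp (List.getLast_mem hne)).2
    simpa using this
  · rw [pvG, List.getLast?_eq_some_getLast (h := hne)]
    rfl

-- the strictly-decreasing-index invariant of the reversed dedup
theorem pvPair (l : List (Int × Char)) (h : l.Pairwise (fun p q => p.1 < q.1)) :
    (PySem.Set.ofList ((l.map Prod.snd).reverse)).Pairwise
      (fun a b => pvG l b < pvG l a) := by
  induction l using List.reverseRecOn with
  | nil => simp [PySem.Set.ofList]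
  | append_singleton t p ih =>
    obtain ⟨ht, -, hlt⟩ := List.pairwise_append.mp h
    rw [List.map_append, List.reverse_append]
    simp only [List.map_cons, List.map_nil, List.reverse_cons, List.reverse_nil,
      List.nil_append, List.singleton_append]
    rw [PySem.Set.ofList_cons]
    constructor
    · intro b hb
      obtain ⟨hbS, hbne⟩ := (PySem.Set.mem_discard _ _ _).mp hb
      have hbt : b ∈ t.map Prod.snd := by
        rw [← List.mem_reverse]; exact (PySem.Set.mem_ofList _ _).mp hbS
      obtain ⟨q, hq, hq2, hqv⟩ := pvG_mem t b hbt
      rw [pvG_concat, pvG_concat, if_pos rfl, if_neg (fun hh => hbne hh.symm), hqv]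
      exact hlt q hq p (by simp)
    · have hsub : List.Sublist
          (PySem.Set.discard (PySem.Set.ofList ((t.map Prod.snd).reverse)) p.2)
          (PySem.Set.ofList ((t.map Prod.snd).reverse)) := List.filter_sublist
      refine ((ih ht).sublist hsub).imp_of_mem ?_
      intro a b ha hb hab
      have hane := ((PySem.Set.mem_discard _ _ _).mp ha).2
      have hbne := ((PySem.Set.mem_discard _ _ _).mp hb).2
      rw [pvG_concat, pvG_concat, if_neg (fun hh => hbne hh.symm),
        if_neg (fun hh => hane hh.symm)]
      exact hab

-- keys of B's last-index dict: the distinct lowercase letters, value = last index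
theorem pvOrder (cs : List Char) :
    PySem.List.sorted (pvF ((PySem.List.enumerate cs 0).filter (fun p => pvLow p.2))).keys
        (fun c => (pvF ((PySem.List.enumerate cs 0).filter (fun p => pvLow p.2))).getD c 0) false
      = (PySem.List.dedup ((cs.filter pvLow).reverse)).reverse := by
  set elf := (PySem.List.enumerate cs 0).filter (fun p => pvLow p.2) with helf
  have hkey : (fun c => (pvF elf).getD c 0) = pvG elf := funext (pvG_eq elf)
  have hsnd : elf.map Prod.snd = cs.filter pvLow := by
    rw [helf, show (fun p : Int × Char => pvLow p.2) = (pvLow ∘ Prod.snd) from rfl,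
      ← List.filter_map, PySem.List.map_snd_enumerate]
  have hK : (pvF elf).keys = PySem.Set.ofList (cs.filter pvLow) := by
    rw [pvF, PySem.Dict.keys_foldl_insert_key elf Prod.snd (fun d p => p.1) PySem.Dict.empty,
      PySem.Dict.keys_empty, PySem.Set.update_nil_left, hsnd]
  have hpf : elf.Pairwise (fun p q : Int × Char => p.1 < q.1) :=
    (PySem.List.pairwise_lt_enumerate cs 0).sublist List.filter_sublist
  have hpw := pvPair elf hpf
  rw [hsnd] at hpw
  rw [hkey]
  apply PySem.List.sorted_eq_of_perm_of_pairwise_lt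
  · rw [hK, PySem.List.dedup_eq_ofList]
    rw [List.perm_ext_iff_of_nodup
      (List.nodup_reverse.mpr (PySem.Set.nodup_ofList _)) (PySem.Set.nodup_ofList _)]
    intro a
    rw [List.mem_reverse, PySem.Set.mem_ofList, PySem.Set.mem_ofList, List.mem_reverse]
  · rw [PySem.List.dedup_eq_ofList, List.pairwise_reverse]
    exact hpw

theorem pvMkInj : Function.Injective (fun c => String.ofList [c]) := by
  intro a b h
  have := congrArg String.toList h
  simpa using this

-- ===== VERDICT (by name: the statement is the Claim_ definition above) =====
theorem coppie_spec : Claim_equal_coppie := by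
  intro s1 _
  unfold Spec_coppie coppie coppie_alt ordinamento disordinamento
  simp only [String.toList_ofList]
  rw [pvMain s1.toList]
  rw [show (fun p : Int × Char => decide ('a' ≤ p.2 ∧ p.2 ≤ 'z')) = (fun p : Int × Char => pvLow p.2) from rfl,
    show ((PySem.List.enumerate s1.toList 0).filter (fun p => pvLow p.2)).foldl
        (fun d p => d.insert p.2 p.1) (PySem.Dict.empty : PySem.Dict Char Int)
      = pvF ((PySem.List.enumerate s1.toList 0).filter (fun p => pvLow p.2)) from rfl,
    pvOrder s1.toList]
  set L := (PySem.List.dedup ((s1.toList.filter pvLow).reverse)).reverse with hL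
  set S := PySem.List.sorted L (fun c => c) false with hS
  have hnd : L.Nodup := List.nodup_reverse.mpr (PySem.List.nodup_dedup _)
  have hlen : S.length = L.length := by rw [hS]; exact PySem.List.length_sorted L _ _
  have Meq : (List.range L.length).map (fun i => String.ofList [L.getD i ' '])
      = L.map (fun c => String.ofList [c]) := by
    apply List.ext_getElem
    · simp
    · intro i h1 h2
      simp only [List.getElem_map, List.getElem_range]
      rw [List.getD_eq_getElem _ _ (by simpa using h2)]
  have Peq : (List.range L.length).map
        (fun i => (String.ofList [L.getD i ' '], String.ofList [S.getD i ' ']))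
      = (L.map (fun c => String.ofList [c])).zip (S.map (fun c => String.ofList [c])) := by
    apply List.ext_getElem
    · simp [hlen]
    · intro i h1 h2
      have hiL : i < L.length := by simpa using h1
      have hiS : i < S.length := by rw [hlen]; exact hiL
      simp only [List.getElem_map, List.getElem_range, List.getElem_zip]
      rw [List.getD_eq_getElem _ _ hiL, List.getD_eq_getElem _ _ hiS]
  have hndmap : (L.map (fun c => String.ofList [c])).Nodup := hnd.map pvMkInj
  have hA := PySem.Dict.items_foldl_insert_fresh (List.range L.length)
      (fun i => String.ofList [L.getD i ' ']) (fun i => String.ofList [S.getD i ' '])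
      PySem.Dict.empty (by intro a _; simp [PySem.Dict.contains_empty]) (Meq ▸ hndmap)
  simp only [] at hA
  rw [hA]
  simp only [PySem.Dict.ofList, PySem.Dict.update]
  have hzlen : (L.map (fun c => String.ofList [c])).length
      ≤ (S.map (fun c => String.ofList [c])).length := by simp [hlen]
  have hB := PySem.Dict.items_foldl_insert_fresh
      ((L.map (fun c => String.ofList [c])).zip (S.map (fun c => String.ofList [c])))
      Prod.fst Prod.snd PySem.Dict.empty
      (by intro a _; simp [PySem.Dict.contains_empty])
      (by rw [List.map_fst_zip hzlen]; exact hndmap)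
  simp only [] at hB
  rw [hB]
  rw [Peq]
  simp
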